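-- pv_equiv track=rewrite | github.com/pypi-data/pypi-mirror-404 | packages/ArWikiCats/arwikicats-0.1.0b6.tar.gz/arwikicats-0.1.0b6/ArWikiCats/legacy_bots/end_start_bots/fax2_episodes.py | get_episodes
-- ===== SOURCE A (Python) =====
-- from typing import Tuple
--
-- def get_episodes(category3: str, category3_nolower: str = "") -> Tuple[str, str]:
--     """
--     examples:
--     Category:2016 American television episodes
--     Category:Game of Thrones (season 1) episodes
--     Category:Game of Thrones season 1 episodes
--     """
--
--     list_of_cat = ""
--
--     if not category3_nolower:
--         category3_nolower = category3
--
--     category3_nolower = category3_nolower.strip()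
--     category3 = category3.strip()
--     # Generate episode patterns for seasons 1–10
--     for i in range(1, 11):
--         label = f"حلقات {{}} الموسم {i}"
--
--         # Generate both key patterns
--         patterns = [
--             f" (season {i}) episodes",
--             f" season {i} episodes",
--         ]
--
--         for key in patterns:
--             # Use lower() once for comparison
--             if category3.lower().endswith(key.lower()):
--                 list_of_cat = label
--                 category3 = category3_nolower[: -len(key)].strip()
--                 return list_of_cat, category3
--
--     list_of_cat = "حلقات {}"
--     if category3.lower().endswith("episodes"):
--         category3 = category3_nolower[: -len("episodes")].strip()
--
--     return list_of_cat, category3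
-- ===== SOURCE B (Python) =====
-- def get_episodes(category3: str, category3_nolower: str = ""):
--     """Parse the trailing '(season N) episodes' / 'season N episodes' suffix
--     by scanning the end of the string once, instead of looping over 20
--     precomputed patterns."""
--     if not category3_nolower:
--         category3_nolower = category3
--     category3_nolower = category3_nolower.strip()
--     category3 = category3.strip()
--     low = category3.lower()
--
--     if low.endswith(" episodes"):
--         stem = low[: -len(" episodes")]
--         paren = stem.endswith(")")
--         core = stem[:-1] if paren else stem
--         # peel the maximal digit run off the end of core
--         j = len(core)
--         while j > 0 and core[j - 1].isdigit():
--             j -= 1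
--         num = core[j:]
--         head = core[:j]
--         marker = " (season " if paren else " season "
--         if num in ("1", "2", "3", "4", "5", "6", "7", "8", "9", "10") and head.endswith(marker):
--             keylen = len(marker) + len(num) + (1 if paren else 0) + len(" episodes")
--             return f"حلقات {{}} الموسم {int(num)}", category3_nolower[:-keylen].strip()
--
--     if low.endswith("episodes"):
--         category3 = category3_nolower[: -len("episodes")].strip()
--     return "حلقات {}", category3
-- ===== Notes on version B (the rewrite author's own statement) =====
-- stated objective: simpler
-- what changed: Replaces A's loop over 10x2 precomputed season suffix patterns (each compared against a fresh lower() of the whole string) by a single backward parse of the suffix: lower once, drop the trailing episodes word, drop an optional closing parenthesis, peel the maximal trailing digit run, and accept it if it is 1-10 and preceded by the season marker.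
import Mathlib
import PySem

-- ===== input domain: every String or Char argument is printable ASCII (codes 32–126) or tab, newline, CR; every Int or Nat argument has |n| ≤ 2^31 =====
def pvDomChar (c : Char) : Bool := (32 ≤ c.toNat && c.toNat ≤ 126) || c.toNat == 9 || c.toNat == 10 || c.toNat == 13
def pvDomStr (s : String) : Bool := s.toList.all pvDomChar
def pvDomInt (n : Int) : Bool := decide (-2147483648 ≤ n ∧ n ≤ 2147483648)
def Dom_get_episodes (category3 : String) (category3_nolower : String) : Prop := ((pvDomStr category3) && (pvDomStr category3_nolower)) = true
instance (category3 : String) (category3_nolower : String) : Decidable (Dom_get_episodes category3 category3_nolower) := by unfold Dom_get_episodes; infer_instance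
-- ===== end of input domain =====

-- B replaces A's 10×2 precomputed-pattern suffix loop by a single backward parse of the
-- " ... season N episodes" suffix (simpler, one pass over the suffix); same return value everywhere.

-- ===== PORT A =====
-- inner `for key in patterns` loop of A: first matching key wins (early return)
def epTryKeys (category3 : String) (category3_nolower : String) (label : String) : List String → Option (String × String)
  | [] => none
  | key :: rest =>
    if PySem.Str.endswith (PySem.Str.lower category3) (PySem.Str.lower key) then
      some (label, PySem.Str.strip (PySem.Str.slice category3_nolower none (some (-(PySem.Str.len key)))))
    else epTryKeys category3 category3_nolower label rest

-- outer `for i in range(1, 11)` loop of A, with early return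
def epLoopA (category3 : String) (category3_nolower : String) : List Int → Option (String × String)
  | [] => none
  | i :: rest =>
    let label := "حلقات {} الموسم " ++ PySem.Int.toStr i
    let patterns := [" (season " ++ PySem.Int.toStr i ++ ") episodes",
                     " season " ++ PySem.Int.toStr i ++ " episodes"]
    match epTryKeys category3 category3_nolower label patterns with
    | some r => r
    | none => epLoopA category3 category3_nolower rest

-- body of A after the strip() preprocessing
def epMainA (category3 : String) (category3_nolower : String) : String × String :=
  match epLoopA category3 category3_nolower (PySem.List.pyRange 1 11 1) with
  | some r => r
  | none =>
    let list_of_cat := "حلقات {}"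
    if PySem.Str.endswith (PySem.Str.lower category3) "episodes" then
      (list_of_cat, PySem.Str.strip (PySem.Str.slice category3_nolower none (some (-(8:Int)))))
    else (list_of_cat, category3)

def get_episodes (category3 : String) (category3_nolower : String) : String × String :=
  let category3_nolower := if category3_nolower = "" then category3 else category3_nolower
  epMainA (PySem.Str.strip category3) (PySem.Str.strip category3_nolower)

-- ===== PORT B =====
-- `c.isdigit()` for one ASCII char (exact on the stated printable-ASCII domain)
def epIsDigit (c : Char) : Bool := '0' ≤ c && c ≤ '9'

-- Source B's `while j > 0 and core[j - 1].isdigit(): j -= 1`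
def epScan (cs : List Char) : Nat → Nat
  | 0 => 0
  | j + 1 => if epIsDigit (cs.getD j ' ') then epScan cs j else j + 1

-- the season-suffix attempt of Source B (early return → Option); Python string indexing/slicing
-- of `core` is done on the char list
def epSeasonB (low : String) (category3_nolower : String) : Option (String × String) :=
  if PySem.Str.endswith low " episodes" then
    let stem := PySem.Str.slice low none (some (-(9:Int)))
    let paren := PySem.Str.endswith stem ")"
    let core := if paren then PySem.Str.slice stem none (some (-(1:Int))) else stem
    let j := epScan core.toList core.toList.length
    let num := (core.toList.drop j)
    let head := String.ofList (core.toList.take j)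
    let marker := if paren then " (season " else " season "
    if (String.ofList num ∈ ["1","2","3","4","5","6","7","8","9","10"] ∧ PySem.Str.endswith head marker = true : Prop) then
      let keylen : Int := (PySem.Str.len marker) + num.length + (if paren then 1 else 0) + 9
      -- int(num): always succeeds here, `.getD 0` is only a totality guard
      some ("حلقات {} الموسم " ++ PySem.Int.toStr ((PySem.Int.ofChars? num).getD 0),
            PySem.Str.strip (PySem.Str.slice category3_nolower none (some (-keylen))))
    else none
  else none

-- body of B after the strip() preprocessing
def epMainB (category3 : String) (category3_nolower : String) : String × String :=
  let low := PySem.Str.lower category3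
  match epSeasonB low category3_nolower with
  | some r => r
  | none =>
    if PySem.Str.endswith low "episodes" then
      ("حلقات {}", PySem.Str.strip (PySem.Str.slice category3_nolower none (some (-(8:Int)))))
    else ("حلقات {}", category3)

def get_episodes_alt (category3 : String) (category3_nolower : String) : String × String :=
  let category3_nolower := if category3_nolower = "" then category3 else category3_nolower
  epMainB (PySem.Str.strip category3) (PySem.Str.strip category3_nolower)

-- ===== PRECONDITION & SPEC =====
def Spec_get_episodes (category3 : String) (category3_nolower : String) (out : String × String) : Prop := out = get_episodes_alt category3 category3_nolower
instance (category3 : String) (category3_nolower : String) (out : String × String) : Decidable (Spec_get_episodes category3 category3_nolower out) := by unfold Spec_get_episodes; infer_instance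

-- ===== CLAIM (what is proved, stated in full; the proofs are below) =====
def Claim_equal_get_episodes : Prop := ∀ (category3 : String) (category3_nolower : String), Dom_get_episodes category3 category3_nolower → Spec_get_episodes category3 category3_nolower (get_episodes category3 category3_nolower)

-- ===== LEMMAS AND PROOFS =====

theorem slice_neg (cs : List Char) (b : Int) (hb : b < 0) :
    PySem.List.slice cs none (some b) = cs.take (cs.length - (-b).toNat) := by
  simp only [PySem.List.slice, PySem.List.clampIdx]
  split_ifs <;> simp <;> omega


theorem epScan_frozen (ys ext : List Char) (j : Nat) (hj : j ≤ ys.length) :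
    epScan (ys ++ ext) j = epScan ys j := by
  induction j with
  | zero => rfl
  | succ n ih =>
    simp only [epScan]
    rw [List.getD_append _ _ _ _ (by omega), ih (by omega)]


theorem epScan_digits (xs : List Char) (D : List Char) (hdig : ∀ c ∈ D, epIsDigit c = true) :
    epScan (xs ++ D) (xs.length + D.length) = epScan (xs ++ D) xs.length := by
  induction D using List.reverseRecOn with
  | nil => simp
  | append_singleton E d ih =>
    have hd : epIsDigit d = true := hdig d (by simp)
    have hE : ∀ c ∈ E, epIsDigit c = true := fun c hc => hdig c (by simp [hc])
    have h1 : (xs ++ (E ++ [d])).getD (xs.length + E.length) ' ' = d := by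
      rw [← List.append_assoc, List.getD_append_right _ _ _ _ (by simp)]
      simp
    have hlen : xs.length + (E ++ [d]).length = (xs.length + E.length) + 1 := by simp; omega
    rw [hlen]
    simp only [epScan, h1, hd, if_true]
    rw [← List.append_assoc, epScan_frozen (xs ++ E) [d] _ (by simp),
        epScan_frozen (xs ++ E) [d] _ (by simp), ih hE]


theorem epScan_calc (xs D : List Char) (hdig : ∀ c ∈ D, epIsDigit c = true) (hne : xs ≠ [])
    (hx : epIsDigit ((xs ++ D).getD (xs.length - 1) ' ') = false) :
    epScan (xs ++ D) (xs ++ D).length = xs.length := by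
  rw [List.length_append, epScan_digits xs D hdig]
  obtain ⟨m, hm⟩ : ∃ m, xs.length = m + 1 := by
    cases hxs : xs.length with
    | zero => exact absurd (List.length_eq_zero_iff.mp hxs) hne
    | succ m => exact ⟨m, rfl⟩
  rw [hm] at hx ⊢
  simp only [epScan, Nat.add_sub_cancel] at hx ⊢
  rw [hx]; simp


theorem seasonB_hit_paren (low nl : String) (p D : List Char)
    (hdig : ∀ c ∈ D, epIsDigit c = true)
    (hmem : String.ofList D ∈ (["1","2","3","4","5","6","7","8","9","10"] : List String))
    (hlow : low.toList = p ++ " (season ".toList ++ D ++ ") episodes".toList) :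
    epSeasonB low nl = some ("حلقات {} الموسم " ++ PySem.Int.toStr ((PySem.Int.ofChars? D).getD 0),
      PySem.Str.strip (PySem.Str.slice nl none (some (-(19 + (D.length:Int)))))) := by
  have hq : low.toList = (p ++ " (season ".toList ++ D ++ [')']) ++ " episodes".toList := by
    rw [hlow]; simp [List.append_assoc]
  have h1 : PySem.Str.endswith low " episodes" = true := by
    rw [PySem.Str.endswith_eq, PySem.Chars.endswith_iff, hq]
    exact List.suffix_append _ _
  have hstem : (PySem.Str.slice low none (some (-(9:Int)))).toList
      = p ++ " (season ".toList ++ D ++ [')'] := by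
    rw [PySem.Str.toList_slice, PySem.Chars.slice_eq_listSlice, slice_neg _ (-9) (by norm_num), hq]
    exact List.take_left' (by simp; omega)
  have h2 : PySem.Str.endswith (PySem.Str.slice low none (some (-(9:Int)))) ")" = true := by
    rw [PySem.Str.endswith_eq, PySem.Chars.endswith_iff, hstem]
    exact ⟨_, rfl⟩
  have hcore : (PySem.Str.slice (PySem.Str.slice low none (some (-(9:Int)))) none (some (-(1:Int)))).toList
      = (p ++ " (season ".toList) ++ D := by
    rw [PySem.Str.toList_slice, PySem.Chars.slice_eq_listSlice, slice_neg _ (-1) (by norm_num), hstem]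
    rw [show p ++ " (season ".toList ++ D ++ [')'] = ((p ++ " (season ".toList) ++ D) ++ [')'] by simp]
    exact List.take_left' (by simp)
  have hj : epScan ((p ++ " (season ".toList) ++ D) ((p ++ " (season ".toList) ++ D).length
      = (p ++ " (season ".toList).length := by
    apply epScan_calc _ _ hdig (by simp)
    rw [List.append_assoc, List.getD_append_right _ _ _ _ (by simp)]
    rw [show (p ++ " (season ".toList).length - 1 - p.length = 8 by simp]
    rw [List.getD_append _ _ _ _ (by simp)]
    decide
  simp only [epSeasonB, h1, if_true, h2, hcore]
  rw [hj, List.drop_left, List.take_left]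
  have h3 : (String.ofList D ∈ (["1","2","3","4","5","6","7","8","9","10"] : List String) ∧
      PySem.Str.endswith (String.ofList (p ++ " (season ".toList)) " (season " = true) := by
    refine ⟨hmem, ?_⟩
    rw [PySem.Str.endswith_eq, PySem.Chars.endswith_iff]
    simp only [String.toList_ofList]
    exact List.suffix_append _ _
  rw [if_pos h3]
  simp only [show PySem.Str.len " (season " = (9:Int) from by decide]
  norm_num
  ring_nf


theorem seasonB_hit_nopar (low nl : String) (p D : List Char)
    (hdig : ∀ c ∈ D, epIsDigit c = true) (hD : D ≠ [])
    (hmem : String.ofList D ∈ (["1","2","3","4","5","6","7","8","9","10"] : List String))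
    (hlow : low.toList = p ++ " season ".toList ++ D ++ " episodes".toList) :
    epSeasonB low nl = some ("حلقات {} الموسم " ++ PySem.Int.toStr ((PySem.Int.ofChars? D).getD 0),
      PySem.Str.strip (PySem.Str.slice nl none (some (-(17 + (D.length:Int)))))) := by
  have hq : low.toList = ((p ++ " season ".toList) ++ D) ++ " episodes".toList := by
    simp [hlow, List.append_assoc]
  have h1 : PySem.Str.endswith low " episodes" = true := by
    rw [PySem.Str.endswith_eq, PySem.Chars.endswith_iff, hq]
    exact List.suffix_append _ _
  have hstem : (PySem.Str.slice low none (some (-(9:Int)))).toList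
      = (p ++ " season ".toList) ++ D := by
    rw [PySem.Str.toList_slice, PySem.Chars.slice_eq_listSlice, slice_neg _ (-9) (by norm_num), hq]
    exact List.take_left' (by simp; omega)
  have h2 : PySem.Str.endswith (PySem.Str.slice low none (some (-(9:Int)))) ")" = false := by
    have hne : ¬ (PySem.Chars.endswith (PySem.Str.slice low none (some (-(9:Int)))).toList ")".toList = true) := by
      rw [PySem.Chars.endswith_iff, hstem]
      rintro ⟨t, ht⟩
      have h5 : (t ++ ")".toList).getLast? = some ')' := by simp
      rw [ht, List.getLast?_append_of_ne_nil _ hD] at h5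
      have h6 : ')' ∈ D := List.mem_of_getLast? h5
      have := hdig _ h6
      simp [epIsDigit] at this
    rw [PySem.Str.endswith_eq]
    exact Bool.eq_false_iff.mpr (fun h => hne h)
  have hj : epScan ((p ++ " season ".toList) ++ D) ((p ++ " season ".toList) ++ D).length
      = (p ++ " season ".toList).length := by
    apply epScan_calc _ _ hdig (by simp)
    rw [List.append_assoc, List.getD_append_right _ _ _ _ (by simp)]
    rw [show (p ++ " season ".toList).length - 1 - p.length = 7 by simp]
    rw [List.getD_append _ _ _ _ (by simp)]
    decide
  simp only [epSeasonB, h1, if_true, h2, hstem, Bool.false_eq_true, if_false]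
  rw [hj, List.drop_left, List.take_left]
  have h3 : (String.ofList D ∈ (["1","2","3","4","5","6","7","8","9","10"] : List String) ∧
      PySem.Str.endswith (String.ofList (p ++ " season ".toList)) " season " = true) := by
    refine ⟨hmem, ?_⟩
    rw [PySem.Str.endswith_eq, PySem.Chars.endswith_iff]
    simp only [String.toList_ofList]
    exact List.suffix_append _ _
  rw [if_pos h3]
  simp only [show PySem.Str.len " season " = (8:Int) from by decide]
  norm_num
  ring_nf


theorem seasonB_some_shape {low nl : String} {r : String × String}
    (h : epSeasonB low nl = some r) :
    ∃ (p D : List Char), String.ofList D ∈ (["1","2","3","4","5","6","7","8","9","10"] : List String) ∧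
      ((low.toList = p ++ " (season ".toList ++ D ++ ") episodes".toList) ∨
       (low.toList = p ++ " season ".toList ++ D ++ " episodes".toList)) := by
  by_cases h1 : PySem.Str.endswith low " episodes" = true
  case neg => simp only [epSeasonB] at h; rw [if_neg h1] at h; exact absurd h (by simp)
  obtain ⟨q, hq⟩ : ∃ q, q ++ " episodes".toList = low.toList := by
    rw [PySem.Str.endswith_eq, PySem.Chars.endswith_iff] at h1; exact h1
  have hstem : (PySem.Str.slice low none (some (-(9:Int)))).toList = q := by
    rw [PySem.Str.toList_slice, PySem.Chars.slice_eq_listSlice, slice_neg _ (-9) (by norm_num), ← hq]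
    exact List.take_left' (by simp)
  simp only [epSeasonB, h1, if_true] at h
  by_cases h2 : PySem.Str.endswith (PySem.Str.slice low none (some (-(9:Int)))) ")" = true
  · -- paren case
    obtain ⟨q', hq'⟩ : ∃ q', q' ++ [')'] = q := by
      rw [PySem.Str.endswith_eq, PySem.Chars.endswith_iff, hstem] at h2; exact h2
    have hcore : (PySem.Str.slice (PySem.Str.slice low none (some (-(9:Int)))) none (some (-(1:Int)))).toList = q' := by
      rw [PySem.Str.toList_slice, PySem.Chars.slice_eq_listSlice, slice_neg _ (-1) (by norm_num), hstem, ← hq']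
      exact List.take_left' (by simp)
    rw [h2] at h
    simp only [if_true, hcore] at h
    by_cases h3 : (String.ofList (q'.drop (epScan q' q'.length)) ∈ (["1","2","3","4","5","6","7","8","9","10"] : List String) ∧
        PySem.Str.endswith (String.ofList (q'.take (epScan q' q'.length))) " (season " = true)
    · obtain ⟨hmem, hends⟩ := h3
      rw [PySem.Str.endswith_eq, PySem.Chars.endswith_iff, String.toList_ofList] at hends
      obtain ⟨p, hp⟩ := hends
      refine ⟨p, q'.drop (epScan q' q'.length), hmem, Or.inl ?_⟩
      set j := epScan q' q'.length with hjdef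
      set D := q'.drop j with hDdef
      have hsplit : q' = q'.take j ++ D := (List.take_append_drop j q').symm
      rw [String.toList_ofList] at hp
      rw [← hq, ← hq', hsplit, ← hp]
      simp [List.append_assoc]
    · rw [if_neg h3] at h; exact absurd h (by simp)
  · -- no-paren case
    obtain hcore : (if PySem.Str.endswith (PySem.Str.slice low none (some (-(9:Int)))) ")" = true then
        PySem.Str.slice (PySem.Str.slice low none (some (-(9:Int)))) none (some (-(1:Int)))
      else PySem.Str.slice low none (some (-(9:Int)))) = PySem.Str.slice low none (some (-(9:Int))) := by
      rw [if_neg h2]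
    simp only [Bool.not_eq_true] at h2
    rw [h2] at h
    simp only [Bool.false_eq_true, if_false, hstem] at h
    by_cases h3 : (String.ofList (q.drop (epScan q q.length)) ∈ (["1","2","3","4","5","6","7","8","9","10"] : List String) ∧
        PySem.Str.endswith (String.ofList (q.take (epScan q q.length))) " season " = true)
    · obtain ⟨hmem, hends⟩ := h3
      rw [PySem.Str.endswith_eq, PySem.Chars.endswith_iff, String.toList_ofList] at hends
      obtain ⟨p, hp⟩ := hends
      refine ⟨p, q.drop (epScan q q.length), hmem, Or.inr ?_⟩
      set j := epScan q q.length with hjdef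
      set D := q.drop j with hDdef
      have hsplit : q = q.take j ++ D := (List.take_append_drop j q).symm
      rw [String.toList_ofList] at hp
      rw [← hq, hsplit, ← hp]
      simp [List.append_assoc]
    · rw [if_neg h3] at h; exact absurd h (by simp)


theorem epLoopA_some {c3 nl : String} {l : List Int} {r : String × String}
    (h : epLoopA c3 nl l = some r) :
    ∃ i ∈ l,
      (PySem.Str.endswith (PySem.Str.lower c3) (PySem.Str.lower (" (season " ++ PySem.Int.toStr i ++ ") episodes")) = true ∧
        r = ("حلقات {} الموسم " ++ PySem.Int.toStr i,
          PySem.Str.strip (PySem.Str.slice nl none (some (-(PySem.Str.len (" (season " ++ PySem.Int.toStr i ++ ") episodes"))))))) ∨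
      (PySem.Str.endswith (PySem.Str.lower c3) (PySem.Str.lower (" season " ++ PySem.Int.toStr i ++ " episodes")) = true ∧
        r = ("حلقات {} الموسم " ++ PySem.Int.toStr i,
          PySem.Str.strip (PySem.Str.slice nl none (some (-(PySem.Str.len (" season " ++ PySem.Int.toStr i ++ " episodes"))))))) := by
  induction l with
  | nil => exact absurd h (by simp [epLoopA])
  | cons i rest ih =>
    simp only [epLoopA, epTryKeys] at h
    by_cases h1 : PySem.Str.endswith (PySem.Str.lower c3) (PySem.Str.lower (" (season " ++ PySem.Int.toStr i ++ ") episodes")) = true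
    · rw [if_pos h1] at h
      refine ⟨i, by simp, Or.inl ⟨h1, ?_⟩⟩
      simpa using h.symm
    · rw [if_neg h1] at h
      by_cases h2 : PySem.Str.endswith (PySem.Str.lower c3) (PySem.Str.lower (" season " ++ PySem.Int.toStr i ++ " episodes")) = true
      · rw [if_pos h2] at h
        refine ⟨i, by simp, Or.inr ⟨h2, ?_⟩⟩
        simpa using h.symm
      · rw [if_neg h2] at h
        obtain ⟨i', hi', hc⟩ := ih h
        exact ⟨i', by simp [hi'], hc⟩

theorem epLoopA_none {c3 nl : String} {l : List Int}
    (h : epLoopA c3 nl l = none) :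
    ∀ i ∈ l,
      PySem.Str.endswith (PySem.Str.lower c3) (PySem.Str.lower (" (season " ++ PySem.Int.toStr i ++ ") episodes")) = false ∧
      PySem.Str.endswith (PySem.Str.lower c3) (PySem.Str.lower (" season " ++ PySem.Int.toStr i ++ " episodes")) = false := by
  induction l with
  | nil => simp
  | cons i rest ih =>
    simp only [epLoopA, epTryKeys] at h
    by_cases h1 : PySem.Str.endswith (PySem.Str.lower c3) (PySem.Str.lower (" (season " ++ PySem.Int.toStr i ++ ") episodes")) = true
    · rw [if_pos h1] at h; exact absurd h (by simp)
    · rw [if_neg h1] at h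
      by_cases h2 : PySem.Str.endswith (PySem.Str.lower c3) (PySem.Str.lower (" season " ++ PySem.Int.toStr i ++ " episodes")) = true
      · rw [if_pos h2] at h; exact absurd h (by simp)
      · rw [if_neg h2] at h
        intro i' hi'
        rcases List.mem_cons.mp hi' with rfl | hmem
        · exact ⟨Bool.eq_false_iff.mpr h1, Bool.eq_false_iff.mpr h2⟩
        · exact ih h i' hmem


theorem epLab1 : ("حلقات {} الموسم " ++ PySem.Int.toStr ((PySem.Int.ofChars? (['1'] : List Char)).getD 0)) = ("حلقات {} الموسم " ++ PySem.Int.toStr 1) := by decide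
theorem epDig1 : ∀ c ∈ (['1'] : List Char), epIsDigit c = true := by simp [epIsDigit]
theorem epNe1 : (['1'] : List Char) ≠ [] := by decide
theorem epMem1 : String.ofList (['1'] : List Char) ∈ (["1","2","3","4","5","6","7","8","9","10"] : List String) := by decide
theorem epKL_p1 : PySem.Str.lower (" (season " ++ PySem.Int.toStr 1 ++ ") episodes") = " (season 1) episodes" := by decide
theorem epLenB_p1 : (-(19 + (((['1'] : List Char).length : Nat) : Int))) = (-(20:Int)) := by decide
theorem epLenA_p1 : (-(PySem.Str.len (" (season " ++ PySem.Int.toStr 1 ++ ") episodes"))) = (-(20:Int)) := by decide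
theorem epKL_n1 : PySem.Str.lower (" season " ++ PySem.Int.toStr 1 ++ " episodes") = " season 1 episodes" := by decide
theorem epLenB_n1 : (-(17 + (((['1'] : List Char).length : Nat) : Int))) = (-(18:Int)) := by decide
theorem epLenA_n1 : (-(PySem.Str.len (" season " ++ PySem.Int.toStr 1 ++ " episodes"))) = (-(18:Int)) := by decide
theorem epLab2 : ("حلقات {} الموسم " ++ PySem.Int.toStr ((PySem.Int.ofChars? (['2'] : List Char)).getD 0)) = ("حلقات {} الموسم " ++ PySem.Int.toStr 2) := by decide
theorem epDig2 : ∀ c ∈ (['2'] : List Char), epIsDigit c = true := by simp [epIsDigit]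
theorem epNe2 : (['2'] : List Char) ≠ [] := by decide
theorem epMem2 : String.ofList (['2'] : List Char) ∈ (["1","2","3","4","5","6","7","8","9","10"] : List String) := by decide
theorem epKL_p2 : PySem.Str.lower (" (season " ++ PySem.Int.toStr 2 ++ ") episodes") = " (season 2) episodes" := by decide
theorem epLenB_p2 : (-(19 + (((['2'] : List Char).length : Nat) : Int))) = (-(20:Int)) := by decide
theorem epLenA_p2 : (-(PySem.Str.len (" (season " ++ PySem.Int.toStr 2 ++ ") episodes"))) = (-(20:Int)) := by decide
theorem epKL_n2 : PySem.Str.lower (" season " ++ PySem.Int.toStr 2 ++ " episodes") = " season 2 episodes" := by decide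
theorem epLenB_n2 : (-(17 + (((['2'] : List Char).length : Nat) : Int))) = (-(18:Int)) := by decide
theorem epLenA_n2 : (-(PySem.Str.len (" season " ++ PySem.Int.toStr 2 ++ " episodes"))) = (-(18:Int)) := by decide
theorem epLab3 : ("حلقات {} الموسم " ++ PySem.Int.toStr ((PySem.Int.ofChars? (['3'] : List Char)).getD 0)) = ("حلقات {} الموسم " ++ PySem.Int.toStr 3) := by decide
theorem epDig3 : ∀ c ∈ (['3'] : List Char), epIsDigit c = true := by simp [epIsDigit]
theorem epNe3 : (['3'] : List Char) ≠ [] := by decide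
theorem epMem3 : String.ofList (['3'] : List Char) ∈ (["1","2","3","4","5","6","7","8","9","10"] : List String) := by decide
theorem epKL_p3 : PySem.Str.lower (" (season " ++ PySem.Int.toStr 3 ++ ") episodes") = " (season 3) episodes" := by decide
theorem epLenB_p3 : (-(19 + (((['3'] : List Char).length : Nat) : Int))) = (-(20:Int)) := by decide
theorem epLenA_p3 : (-(PySem.Str.len (" (season " ++ PySem.Int.toStr 3 ++ ") episodes"))) = (-(20:Int)) := by decide
theorem epKL_n3 : PySem.Str.lower (" season " ++ PySem.Int.toStr 3 ++ " episodes") = " season 3 episodes" := by decide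
theorem epLenB_n3 : (-(17 + (((['3'] : List Char).length : Nat) : Int))) = (-(18:Int)) := by decide
theorem epLenA_n3 : (-(PySem.Str.len (" season " ++ PySem.Int.toStr 3 ++ " episodes"))) = (-(18:Int)) := by decide
theorem epLab4 : ("حلقات {} الموسم " ++ PySem.Int.toStr ((PySem.Int.ofChars? (['4'] : List Char)).getD 0)) = ("حلقات {} الموسم " ++ PySem.Int.toStr 4) := by decide
theorem epDig4 : ∀ c ∈ (['4'] : List Char), epIsDigit c = true := by simp [epIsDigit]
theorem epNe4 : (['4'] : List Char) ≠ [] := by decide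
theorem epMem4 : String.ofList (['4'] : List Char) ∈ (["1","2","3","4","5","6","7","8","9","10"] : List String) := by decide
theorem epKL_p4 : PySem.Str.lower (" (season " ++ PySem.Int.toStr 4 ++ ") episodes") = " (season 4) episodes" := by decide
theorem epLenB_p4 : (-(19 + (((['4'] : List Char).length : Nat) : Int))) = (-(20:Int)) := by decide
theorem epLenA_p4 : (-(PySem.Str.len (" (season " ++ PySem.Int.toStr 4 ++ ") episodes"))) = (-(20:Int)) := by decide
theorem epKL_n4 : PySem.Str.lower (" season " ++ PySem.Int.toStr 4 ++ " episodes") = " season 4 episodes" := by decide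
theorem epLenB_n4 : (-(17 + (((['4'] : List Char).length : Nat) : Int))) = (-(18:Int)) := by decide
theorem epLenA_n4 : (-(PySem.Str.len (" season " ++ PySem.Int.toStr 4 ++ " episodes"))) = (-(18:Int)) := by decide
theorem epLab5 : ("حلقات {} الموسم " ++ PySem.Int.toStr ((PySem.Int.ofChars? (['5'] : List Char)).getD 0)) = ("حلقات {} الموسم " ++ PySem.Int.toStr 5) := by decide
theorem epDig5 : ∀ c ∈ (['5'] : List Char), epIsDigit c = true := by simp [epIsDigit]
theorem epNe5 : (['5'] : List Char) ≠ [] := by decide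
theorem epMem5 : String.ofList (['5'] : List Char) ∈ (["1","2","3","4","5","6","7","8","9","10"] : List String) := by decide
theorem epKL_p5 : PySem.Str.lower (" (season " ++ PySem.Int.toStr 5 ++ ") episodes") = " (season 5) episodes" := by decide
theorem epLenB_p5 : (-(19 + (((['5'] : List Char).length : Nat) : Int))) = (-(20:Int)) := by decide
theorem epLenA_p5 : (-(PySem.Str.len (" (season " ++ PySem.Int.toStr 5 ++ ") episodes"))) = (-(20:Int)) := by decide
theorem epKL_n5 : PySem.Str.lower (" season " ++ PySem.Int.toStr 5 ++ " episodes") = " season 5 episodes" := by decide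
theorem epLenB_n5 : (-(17 + (((['5'] : List Char).length : Nat) : Int))) = (-(18:Int)) := by decide
theorem epLenA_n5 : (-(PySem.Str.len (" season " ++ PySem.Int.toStr 5 ++ " episodes"))) = (-(18:Int)) := by decide
theorem epLab6 : ("حلقات {} الموسم " ++ PySem.Int.toStr ((PySem.Int.ofChars? (['6'] : List Char)).getD 0)) = ("حلقات {} الموسم " ++ PySem.Int.toStr 6) := by decide
theorem epDig6 : ∀ c ∈ (['6'] : List Char), epIsDigit c = true := by simp [epIsDigit]
theorem epNe6 : (['6'] : List Char) ≠ [] := by decide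
theorem epMem6 : String.ofList (['6'] : List Char) ∈ (["1","2","3","4","5","6","7","8","9","10"] : List String) := by decide
theorem epKL_p6 : PySem.Str.lower (" (season " ++ PySem.Int.toStr 6 ++ ") episodes") = " (season 6) episodes" := by decide
theorem epLenB_p6 : (-(19 + (((['6'] : List Char).length : Nat) : Int))) = (-(20:Int)) := by decide
theorem epLenA_p6 : (-(PySem.Str.len (" (season " ++ PySem.Int.toStr 6 ++ ") episodes"))) = (-(20:Int)) := by decide
theorem epKL_n6 : PySem.Str.lower (" season " ++ PySem.Int.toStr 6 ++ " episodes") = " season 6 episodes" := by decide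
theorem epLenB_n6 : (-(17 + (((['6'] : List Char).length : Nat) : Int))) = (-(18:Int)) := by decide
theorem epLenA_n6 : (-(PySem.Str.len (" season " ++ PySem.Int.toStr 6 ++ " episodes"))) = (-(18:Int)) := by decide
theorem epLab7 : ("حلقات {} الموسم " ++ PySem.Int.toStr ((PySem.Int.ofChars? (['7'] : List Char)).getD 0)) = ("حلقات {} الموسم " ++ PySem.Int.toStr 7) := by decide
theorem epDig7 : ∀ c ∈ (['7'] : List Char), epIsDigit c = true := by simp [epIsDigit]
theorem epNe7 : (['7'] : List Char) ≠ [] := by decide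
theorem epMem7 : String.ofList (['7'] : List Char) ∈ (["1","2","3","4","5","6","7","8","9","10"] : List String) := by decide
theorem epKL_p7 : PySem.Str.lower (" (season " ++ PySem.Int.toStr 7 ++ ") episodes") = " (season 7) episodes" := by decide
theorem epLenB_p7 : (-(19 + (((['7'] : List Char).length : Nat) : Int))) = (-(20:Int)) := by decide
theorem epLenA_p7 : (-(PySem.Str.len (" (season " ++ PySem.Int.toStr 7 ++ ") episodes"))) = (-(20:Int)) := by decide
theorem epKL_n7 : PySem.Str.lower (" season " ++ PySem.Int.toStr 7 ++ " episodes") = " season 7 episodes" := by decide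
theorem epLenB_n7 : (-(17 + (((['7'] : List Char).length : Nat) : Int))) = (-(18:Int)) := by decide
theorem epLenA_n7 : (-(PySem.Str.len (" season " ++ PySem.Int.toStr 7 ++ " episodes"))) = (-(18:Int)) := by decide
theorem epLab8 : ("حلقات {} الموسم " ++ PySem.Int.toStr ((PySem.Int.ofChars? (['8'] : List Char)).getD 0)) = ("حلقات {} الموسم " ++ PySem.Int.toStr 8) := by decide
theorem epDig8 : ∀ c ∈ (['8'] : List Char), epIsDigit c = true := by simp [epIsDigit]
theorem epNe8 : (['8'] : List Char) ≠ [] := by decide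
theorem epMem8 : String.ofList (['8'] : List Char) ∈ (["1","2","3","4","5","6","7","8","9","10"] : List String) := by decide
theorem epKL_p8 : PySem.Str.lower (" (season " ++ PySem.Int.toStr 8 ++ ") episodes") = " (season 8) episodes" := by decide
theorem epLenB_p8 : (-(19 + (((['8'] : List Char).length : Nat) : Int))) = (-(20:Int)) := by decide
theorem epLenA_p8 : (-(PySem.Str.len (" (season " ++ PySem.Int.toStr 8 ++ ") episodes"))) = (-(20:Int)) := by decide
theorem epKL_n8 : PySem.Str.lower (" season " ++ PySem.Int.toStr 8 ++ " episodes") = " season 8 episodes" := by decide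
theorem epLenB_n8 : (-(17 + (((['8'] : List Char).length : Nat) : Int))) = (-(18:Int)) := by decide
theorem epLenA_n8 : (-(PySem.Str.len (" season " ++ PySem.Int.toStr 8 ++ " episodes"))) = (-(18:Int)) := by decide
theorem epLab9 : ("حلقات {} الموسم " ++ PySem.Int.toStr ((PySem.Int.ofChars? (['9'] : List Char)).getD 0)) = ("حلقات {} الموسم " ++ PySem.Int.toStr 9) := by decide
theorem epDig9 : ∀ c ∈ (['9'] : List Char), epIsDigit c = true := by simp [epIsDigit]
theorem epNe9 : (['9'] : List Char) ≠ [] := by decide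
theorem epMem9 : String.ofList (['9'] : List Char) ∈ (["1","2","3","4","5","6","7","8","9","10"] : List String) := by decide
theorem epKL_p9 : PySem.Str.lower (" (season " ++ PySem.Int.toStr 9 ++ ") episodes") = " (season 9) episodes" := by decide
theorem epLenB_p9 : (-(19 + (((['9'] : List Char).length : Nat) : Int))) = (-(20:Int)) := by decide
theorem epLenA_p9 : (-(PySem.Str.len (" (season " ++ PySem.Int.toStr 9 ++ ") episodes"))) = (-(20:Int)) := by decide
theorem epKL_n9 : PySem.Str.lower (" season " ++ PySem.Int.toStr 9 ++ " episodes") = " season 9 episodes" := by decide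
theorem epLenB_n9 : (-(17 + (((['9'] : List Char).length : Nat) : Int))) = (-(18:Int)) := by decide
theorem epLenA_n9 : (-(PySem.Str.len (" season " ++ PySem.Int.toStr 9 ++ " episodes"))) = (-(18:Int)) := by decide
theorem epLab10 : ("حلقات {} الموسم " ++ PySem.Int.toStr ((PySem.Int.ofChars? (['1','0'] : List Char)).getD 0)) = ("حلقات {} الموسم " ++ PySem.Int.toStr 10) := by decide
theorem epDig10 : ∀ c ∈ (['1','0'] : List Char), epIsDigit c = true := by simp [epIsDigit]
theorem epNe10 : (['1','0'] : List Char) ≠ [] := by decide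
theorem epMem10 : String.ofList (['1','0'] : List Char) ∈ (["1","2","3","4","5","6","7","8","9","10"] : List String) := by decide
theorem epKL_p10 : PySem.Str.lower (" (season " ++ PySem.Int.toStr 10 ++ ") episodes") = " (season 10) episodes" := by decide
theorem epLenB_p10 : (-(19 + (((['1','0'] : List Char).length : Nat) : Int))) = (-(21:Int)) := by decide
theorem epLenA_p10 : (-(PySem.Str.len (" (season " ++ PySem.Int.toStr 10 ++ ") episodes"))) = (-(21:Int)) := by decide
theorem epKL_n10 : PySem.Str.lower (" season " ++ PySem.Int.toStr 10 ++ " episodes") = " season 10 episodes" := by decide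
theorem epLenB_n10 : (-(17 + (((['1','0'] : List Char).length : Nat) : Int))) = (-(19:Int)) := by decide
theorem epLenA_n10 : (-(PySem.Str.len (" season " ++ PySem.Int.toStr 10 ++ " episodes"))) = (-(19:Int)) := by decide


theorem epMain_eq (c3 nl : String) : epMainA c3 nl = epMainB c3 nl := by
  cases hA : epLoopA c3 nl (PySem.List.pyRange 1 11 1) with
  | some r =>
    obtain ⟨i, hi, hc⟩ := epLoopA_some hA
    rw [show PySem.List.pyRange 1 11 1 = ([1,2,3,4,5,6,7,8,9,10] : List Int) from by decide] at hi
    fin_cases hi <;> rcases hc with ⟨hend, hr⟩ | ⟨hend, hr⟩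
    · rw [epKL_p1] at hend
      rw [PySem.Str.endswith_eq, PySem.Chars.endswith_iff] at hend
      obtain ⟨p, hp⟩ := hend
      have hlow : (PySem.Str.lower c3).toList = p ++ " (season ".toList ++ (['1'] : List Char) ++ ") episodes".toList := by
        rw [← hp]; simp
      have hB := seasonB_hit_paren (PySem.Str.lower c3) nl p (['1'] : List Char) epDig1 epMem1 hlow
      rw [epLab1, epLenB_p1] at hB
      rw [epLenA_p1] at hr
      simp only [epMainA, epMainB, hA, hB]
      exact hr
    · rw [epKL_n1] at hend
      rw [PySem.Str.endswith_eq, PySem.Chars.endswith_iff] at hend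
      obtain ⟨p, hp⟩ := hend
      have hlow : (PySem.Str.lower c3).toList = p ++ " season ".toList ++ (['1'] : List Char) ++ " episodes".toList := by
        rw [← hp]; simp
      have hB := seasonB_hit_nopar (PySem.Str.lower c3) nl p (['1'] : List Char) epDig1 epNe1 epMem1 hlow
      rw [epLab1, epLenB_n1] at hB
      rw [epLenA_n1] at hr
      simp only [epMainA, epMainB, hA, hB]
      exact hr
    · rw [epKL_p2] at hend
      rw [PySem.Str.endswith_eq, PySem.Chars.endswith_iff] at hend
      obtain ⟨p, hp⟩ := hend
      have hlow : (PySem.Str.lower c3).toList = p ++ " (season ".toList ++ (['2'] : List Char) ++ ") episodes".toList := by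
        rw [← hp]; simp
      have hB := seasonB_hit_paren (PySem.Str.lower c3) nl p (['2'] : List Char) epDig2 epMem2 hlow
      rw [epLab2, epLenB_p2] at hB
      rw [epLenA_p2] at hr
      simp only [epMainA, epMainB, hA, hB]
      exact hr
    · rw [epKL_n2] at hend
      rw [PySem.Str.endswith_eq, PySem.Chars.endswith_iff] at hend
      obtain ⟨p, hp⟩ := hend
      have hlow : (PySem.Str.lower c3).toList = p ++ " season ".toList ++ (['2'] : List Char) ++ " episodes".toList := by
        rw [← hp]; simp
      have hB := seasonB_hit_nopar (PySem.Str.lower c3) nl p (['2'] : List Char) epDig2 epNe2 epMem2 hlow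
      rw [epLab2, epLenB_n2] at hB
      rw [epLenA_n2] at hr
      simp only [epMainA, epMainB, hA, hB]
      exact hr
    · rw [epKL_p3] at hend
      rw [PySem.Str.endswith_eq, PySem.Chars.endswith_iff] at hend
      obtain ⟨p, hp⟩ := hend
      have hlow : (PySem.Str.lower c3).toList = p ++ " (season ".toList ++ (['3'] : List Char) ++ ") episodes".toList := by
        rw [← hp]; simp
      have hB := seasonB_hit_paren (PySem.Str.lower c3) nl p (['3'] : List Char) epDig3 epMem3 hlow
      rw [epLab3, epLenB_p3] at hB
      rw [epLenA_p3] at hr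
      simp only [epMainA, epMainB, hA, hB]
      exact hr
    · rw [epKL_n3] at hend
      rw [PySem.Str.endswith_eq, PySem.Chars.endswith_iff] at hend
      obtain ⟨p, hp⟩ := hend
      have hlow : (PySem.Str.lower c3).toList = p ++ " season ".toList ++ (['3'] : List Char) ++ " episodes".toList := by
        rw [← hp]; simp
      have hB := seasonB_hit_nopar (PySem.Str.lower c3) nl p (['3'] : List Char) epDig3 epNe3 epMem3 hlow
      rw [epLab3, epLenB_n3] at hB
      rw [epLenA_n3] at hr
      simp only [epMainA, epMainB, hA, hB]
      exact hr
    · rw [epKL_p4] at hend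
      rw [PySem.Str.endswith_eq, PySem.Chars.endswith_iff] at hend
      obtain ⟨p, hp⟩ := hend
      have hlow : (PySem.Str.lower c3).toList = p ++ " (season ".toList ++ (['4'] : List Char) ++ ") episodes".toList := by
        rw [← hp]; simp
      have hB := seasonB_hit_paren (PySem.Str.lower c3) nl p (['4'] : List Char) epDig4 epMem4 hlow
      rw [epLab4, epLenB_p4] at hB
      rw [epLenA_p4] at hr
      simp only [epMainA, epMainB, hA, hB]
      exact hr
    · rw [epKL_n4] at hend
      rw [PySem.Str.endswith_eq, PySem.Chars.endswith_iff] at hend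
      obtain ⟨p, hp⟩ := hend
      have hlow : (PySem.Str.lower c3).toList = p ++ " season ".toList ++ (['4'] : List Char) ++ " episodes".toList := by
        rw [← hp]; simp
      have hB := seasonB_hit_nopar (PySem.Str.lower c3) nl p (['4'] : List Char) epDig4 epNe4 epMem4 hlow
      rw [epLab4, epLenB_n4] at hB
      rw [epLenA_n4] at hr
      simp only [epMainA, epMainB, hA, hB]
      exact hr
    · rw [epKL_p5] at hend
      rw [PySem.Str.endswith_eq, PySem.Chars.endswith_iff] at hend
      obtain ⟨p, hp⟩ := hend
      have hlow : (PySem.Str.lower c3).toList = p ++ " (season ".toList ++ (['5'] : List Char) ++ ") episodes".toList := by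
        rw [← hp]; simp
      have hB := seasonB_hit_paren (PySem.Str.lower c3) nl p (['5'] : List Char) epDig5 epMem5 hlow
      rw [epLab5, epLenB_p5] at hB
      rw [epLenA_p5] at hr
      simp only [epMainA, epMainB, hA, hB]
      exact hr
    · rw [epKL_n5] at hend
      rw [PySem.Str.endswith_eq, PySem.Chars.endswith_iff] at hend
      obtain ⟨p, hp⟩ := hend
      have hlow : (PySem.Str.lower c3).toList = p ++ " season ".toList ++ (['5'] : List Char) ++ " episodes".toList := by
        rw [← hp]; simp
      have hB := seasonB_hit_nopar (PySem.Str.lower c3) nl p (['5'] : List Char) epDig5 epNe5 epMem5 hlow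
      rw [epLab5, epLenB_n5] at hB
      rw [epLenA_n5] at hr
      simp only [epMainA, epMainB, hA, hB]
      exact hr
    · rw [epKL_p6] at hend
      rw [PySem.Str.endswith_eq, PySem.Chars.endswith_iff] at hend
      obtain ⟨p, hp⟩ := hend
      have hlow : (PySem.Str.lower c3).toList = p ++ " (season ".toList ++ (['6'] : List Char) ++ ") episodes".toList := by
        rw [← hp]; simp
      have hB := seasonB_hit_paren (PySem.Str.lower c3) nl p (['6'] : List Char) epDig6 epMem6 hlow
      rw [epLab6, epLenB_p6] at hB
      rw [epLenA_p6] at hr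
      simp only [epMainA, epMainB, hA, hB]
      exact hr
    · rw [epKL_n6] at hend
      rw [PySem.Str.endswith_eq, PySem.Chars.endswith_iff] at hend
      obtain ⟨p, hp⟩ := hend
      have hlow : (PySem.Str.lower c3).toList = p ++ " season ".toList ++ (['6'] : List Char) ++ " episodes".toList := by
        rw [← hp]; simp
      have hB := seasonB_hit_nopar (PySem.Str.lower c3) nl p (['6'] : List Char) epDig6 epNe6 epMem6 hlow
      rw [epLab6, epLenB_n6] at hB
      rw [epLenA_n6] at hr
      simp only [epMainA, epMainB, hA, hB]
      exact hr
    · rw [epKL_p7] at hend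
      rw [PySem.Str.endswith_eq, PySem.Chars.endswith_iff] at hend
      obtain ⟨p, hp⟩ := hend
      have hlow : (PySem.Str.lower c3).toList = p ++ " (season ".toList ++ (['7'] : List Char) ++ ") episodes".toList := by
        rw [← hp]; simp
      have hB := seasonB_hit_paren (PySem.Str.lower c3) nl p (['7'] : List Char) epDig7 epMem7 hlow
      rw [epLab7, epLenB_p7] at hB
      rw [epLenA_p7] at hr
      simp only [epMainA, epMainB, hA, hB]
      exact hr
    · rw [epKL_n7] at hend
      rw [PySem.Str.endswith_eq, PySem.Chars.endswith_iff] at hend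
      obtain ⟨p, hp⟩ := hend
      have hlow : (PySem.Str.lower c3).toList = p ++ " season ".toList ++ (['7'] : List Char) ++ " episodes".toList := by
        rw [← hp]; simp
      have hB := seasonB_hit_nopar (PySem.Str.lower c3) nl p (['7'] : List Char) epDig7 epNe7 epMem7 hlow
      rw [epLab7, epLenB_n7] at hB
      rw [epLenA_n7] at hr
      simp only [epMainA, epMainB, hA, hB]
      exact hr
    · rw [epKL_p8] at hend
      rw [PySem.Str.endswith_eq, PySem.Chars.endswith_iff] at hend
      obtain ⟨p, hp⟩ := hend
      have hlow : (PySem.Str.lower c3).toList = p ++ " (season ".toList ++ (['8'] : List Char) ++ ") episodes".toList := by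
        rw [← hp]; simp
      have hB := seasonB_hit_paren (PySem.Str.lower c3) nl p (['8'] : List Char) epDig8 epMem8 hlow
      rw [epLab8, epLenB_p8] at hB
      rw [epLenA_p8] at hr
      simp only [epMainA, epMainB, hA, hB]
      exact hr
    · rw [epKL_n8] at hend
      rw [PySem.Str.endswith_eq, PySem.Chars.endswith_iff] at hend
      obtain ⟨p, hp⟩ := hend
      have hlow : (PySem.Str.lower c3).toList = p ++ " season ".toList ++ (['8'] : List Char) ++ " episodes".toList := by
        rw [← hp]; simp
      have hB := seasonB_hit_nopar (PySem.Str.lower c3) nl p (['8'] : List Char) epDig8 epNe8 epMem8 hlow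
      rw [epLab8, epLenB_n8] at hB
      rw [epLenA_n8] at hr
      simp only [epMainA, epMainB, hA, hB]
      exact hr
    · rw [epKL_p9] at hend
      rw [PySem.Str.endswith_eq, PySem.Chars.endswith_iff] at hend
      obtain ⟨p, hp⟩ := hend
      have hlow : (PySem.Str.lower c3).toList = p ++ " (season ".toList ++ (['9'] : List Char) ++ ") episodes".toList := by
        rw [← hp]; simp
      have hB := seasonB_hit_paren (PySem.Str.lower c3) nl p (['9'] : List Char) epDig9 epMem9 hlow
      rw [epLab9, epLenB_p9] at hB
      rw [epLenA_p9] at hr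
      simp only [epMainA, epMainB, hA, hB]
      exact hr
    · rw [epKL_n9] at hend
      rw [PySem.Str.endswith_eq, PySem.Chars.endswith_iff] at hend
      obtain ⟨p, hp⟩ := hend
      have hlow : (PySem.Str.lower c3).toList = p ++ " season ".toList ++ (['9'] : List Char) ++ " episodes".toList := by
        rw [← hp]; simp
      have hB := seasonB_hit_nopar (PySem.Str.lower c3) nl p (['9'] : List Char) epDig9 epNe9 epMem9 hlow
      rw [epLab9, epLenB_n9] at hB
      rw [epLenA_n9] at hr
      simp only [epMainA, epMainB, hA, hB]
      exact hr
    · rw [epKL_p10] at hend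
      rw [PySem.Str.endswith_eq, PySem.Chars.endswith_iff] at hend
      obtain ⟨p, hp⟩ := hend
      have hlow : (PySem.Str.lower c3).toList = p ++ " (season ".toList ++ (['1','0'] : List Char) ++ ") episodes".toList := by
        rw [← hp]; simp
      have hB := seasonB_hit_paren (PySem.Str.lower c3) nl p (['1','0'] : List Char) epDig10 epMem10 hlow
      rw [epLab10, epLenB_p10] at hB
      rw [epLenA_p10] at hr
      simp only [epMainA, epMainB, hA, hB]
      exact hr
    · rw [epKL_n10] at hend
      rw [PySem.Str.endswith_eq, PySem.Chars.endswith_iff] at hend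
      obtain ⟨p, hp⟩ := hend
      have hlow : (PySem.Str.lower c3).toList = p ++ " season ".toList ++ (['1','0'] : List Char) ++ " episodes".toList := by
        rw [← hp]; simp
      have hB := seasonB_hit_nopar (PySem.Str.lower c3) nl p (['1','0'] : List Char) epDig10 epNe10 epMem10 hlow
      rw [epLab10, epLenB_n10] at hB
      rw [epLenA_n10] at hr
      simp only [epMainA, epMainB, hA, hB]
      exact hr
  | none =>
    have hall := epLoopA_none hA
    have hB : epSeasonB (PySem.Str.lower c3) nl = none := by
      cases hs : epSeasonB (PySem.Str.lower c3) nl with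
      | none => rfl
      | some r =>
        exfalso
        obtain ⟨p, D, hmem, hor⟩ := seasonB_some_shape hs
        simp only [List.mem_cons, List.not_mem_nil, or_false] at hmem
        rcases hor with hlow | hlow <;> rcases hmem with hm|hm|hm|hm|hm|hm|hm|hm|hm|hm
        · have hD : D = (['1'] : List Char) := by
            have h6 := congrArg String.toList hm
            rwa [String.toList_ofList] at h6
          have hend : PySem.Str.endswith (PySem.Str.lower c3) " (season 1) episodes" = true := by
            rw [PySem.Str.endswith_eq, PySem.Chars.endswith_iff]
            exact ⟨p, by rw [hlow, hD]; simp⟩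
          have hfalse := (hall 1 (by decide)).1
          rw [epKL_p1] at hfalse
          rw [hend] at hfalse
          exact absurd hfalse (by simp)
        · have hD : D = (['2'] : List Char) := by
            have h6 := congrArg String.toList hm
            rwa [String.toList_ofList] at h6
          have hend : PySem.Str.endswith (PySem.Str.lower c3) " (season 2) episodes" = true := by
            rw [PySem.Str.endswith_eq, PySem.Chars.endswith_iff]
            exact ⟨p, by rw [hlow, hD]; simp⟩
          have hfalse := (hall 2 (by decide)).1
          rw [epKL_p2] at hfalse
          rw [hend] at hfalse
          exact absurd hfalse (by simp)
        · have hD : D = (['3'] : List Char) := by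
            have h6 := congrArg String.toList hm
            rwa [String.toList_ofList] at h6
          have hend : PySem.Str.endswith (PySem.Str.lower c3) " (season 3) episodes" = true := by
            rw [PySem.Str.endswith_eq, PySem.Chars.endswith_iff]
            exact ⟨p, by rw [hlow, hD]; simp⟩
          have hfalse := (hall 3 (by decide)).1
          rw [epKL_p3] at hfalse
          rw [hend] at hfalse
          exact absurd hfalse (by simp)
        · have hD : D = (['4'] : List Char) := by
            have h6 := congrArg String.toList hm
            rwa [String.toList_ofList] at h6
          have hend : PySem.Str.endswith (PySem.Str.lower c3) " (season 4) episodes" = true := by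
            rw [PySem.Str.endswith_eq, PySem.Chars.endswith_iff]
            exact ⟨p, by rw [hlow, hD]; simp⟩
          have hfalse := (hall 4 (by decide)).1
          rw [epKL_p4] at hfalse
          rw [hend] at hfalse
          exact absurd hfalse (by simp)
        · have hD : D = (['5'] : List Char) := by
            have h6 := congrArg String.toList hm
            rwa [String.toList_ofList] at h6
          have hend : PySem.Str.endswith (PySem.Str.lower c3) " (season 5) episodes" = true := by
            rw [PySem.Str.endswith_eq, PySem.Chars.endswith_iff]
            exact ⟨p, by rw [hlow, hD]; simp⟩
          have hfalse := (hall 5 (by decide)).1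
          rw [epKL_p5] at hfalse
          rw [hend] at hfalse
          exact absurd hfalse (by simp)
        · have hD : D = (['6'] : List Char) := by
            have h6 := congrArg String.toList hm
            rwa [String.toList_ofList] at h6
          have hend : PySem.Str.endswith (PySem.Str.lower c3) " (season 6) episodes" = true := by
            rw [PySem.Str.endswith_eq, PySem.Chars.endswith_iff]
            exact ⟨p, by rw [hlow, hD]; simp⟩
          have hfalse := (hall 6 (by decide)).1
          rw [epKL_p6] at hfalse
          rw [hend] at hfalse
          exact absurd hfalse (by simp)
        · have hD : D = (['7'] : List Char) := by
            have h6 := congrArg String.toList hm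
            rwa [String.toList_ofList] at h6
          have hend : PySem.Str.endswith (PySem.Str.lower c3) " (season 7) episodes" = true := by
            rw [PySem.Str.endswith_eq, PySem.Chars.endswith_iff]
            exact ⟨p, by rw [hlow, hD]; simp⟩
          have hfalse := (hall 7 (by decide)).1
          rw [epKL_p7] at hfalse
          rw [hend] at hfalse
          exact absurd hfalse (by simp)
        · have hD : D = (['8'] : List Char) := by
            have h6 := congrArg String.toList hm
            rwa [String.toList_ofList] at h6
          have hend : PySem.Str.endswith (PySem.Str.lower c3) " (season 8) episodes" = true := by
            rw [PySem.Str.endswith_eq, PySem.Chars.endswith_iff]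
            exact ⟨p, by rw [hlow, hD]; simp⟩
          have hfalse := (hall 8 (by decide)).1
          rw [epKL_p8] at hfalse
          rw [hend] at hfalse
          exact absurd hfalse (by simp)
        · have hD : D = (['9'] : List Char) := by
            have h6 := congrArg String.toList hm
            rwa [String.toList_ofList] at h6
          have hend : PySem.Str.endswith (PySem.Str.lower c3) " (season 9) episodes" = true := by
            rw [PySem.Str.endswith_eq, PySem.Chars.endswith_iff]
            exact ⟨p, by rw [hlow, hD]; simp⟩
          have hfalse := (hall 9 (by decide)).1
          rw [epKL_p9] at hfalse
          rw [hend] at hfalse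
          exact absurd hfalse (by simp)
        · have hD : D = (['1','0'] : List Char) := by
            have h6 := congrArg String.toList hm
            rwa [String.toList_ofList] at h6
          have hend : PySem.Str.endswith (PySem.Str.lower c3) " (season 10) episodes" = true := by
            rw [PySem.Str.endswith_eq, PySem.Chars.endswith_iff]
            exact ⟨p, by rw [hlow, hD]; simp⟩
          have hfalse := (hall 10 (by decide)).1
          rw [epKL_p10] at hfalse
          rw [hend] at hfalse
          exact absurd hfalse (by simp)
        · have hD : D = (['1'] : List Char) := by
            have h6 := congrArg String.toList hm
            rwa [String.toList_ofList] at h6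
          have hend : PySem.Str.endswith (PySem.Str.lower c3) " season 1 episodes" = true := by
            rw [PySem.Str.endswith_eq, PySem.Chars.endswith_iff]
            exact ⟨p, by rw [hlow, hD]; simp⟩
          have hfalse := (hall 1 (by decide)).2
          rw [epKL_n1] at hfalse
          rw [hend] at hfalse
          exact absurd hfalse (by simp)
        · have hD : D = (['2'] : List Char) := by
            have h6 := congrArg String.toList hm
            rwa [String.toList_ofList] at h6
          have hend : PySem.Str.endswith (PySem.Str.lower c3) " season 2 episodes" = true := by
            rw [PySem.Str.endswith_eq, PySem.Chars.endswith_iff]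
            exact ⟨p, by rw [hlow, hD]; simp⟩
          have hfalse := (hall 2 (by decide)).2
          rw [epKL_n2] at hfalse
          rw [hend] at hfalse
          exact absurd hfalse (by simp)
        · have hD : D = (['3'] : List Char) := by
            have h6 := congrArg String.toList hm
            rwa [String.toList_ofList] at h6
          have hend : PySem.Str.endswith (PySem.Str.lower c3) " season 3 episodes" = true := by
            rw [PySem.Str.endswith_eq, PySem.Chars.endswith_iff]
            exact ⟨p, by rw [hlow, hD]; simp⟩
          have hfalse := (hall 3 (by decide)).2
          rw [epKL_n3] at hfalse
          rw [hend] at hfalse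
          exact absurd hfalse (by simp)
        · have hD : D = (['4'] : List Char) := by
            have h6 := congrArg String.toList hm
            rwa [String.toList_ofList] at h6
          have hend : PySem.Str.endswith (PySem.Str.lower c3) " season 4 episodes" = true := by
            rw [PySem.Str.endswith_eq, PySem.Chars.endswith_iff]
            exact ⟨p, by rw [hlow, hD]; simp⟩
          have hfalse := (hall 4 (by decide)).2
          rw [epKL_n4] at hfalse
          rw [hend] at hfalse
          exact absurd hfalse (by simp)
        · have hD : D = (['5'] : List Char) := by
            have h6 := congrArg String.toList hm
            rwa [String.toList_ofList] at h6
          have hend : PySem.Str.endswith (PySem.Str.lower c3) " season 5 episodes" = true := by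
            rw [PySem.Str.endswith_eq, PySem.Chars.endswith_iff]
            exact ⟨p, by rw [hlow, hD]; simp⟩
          have hfalse := (hall 5 (by decide)).2
          rw [epKL_n5] at hfalse
          rw [hend] at hfalse
          exact absurd hfalse (by simp)
        · have hD : D = (['6'] : List Char) := by
            have h6 := congrArg String.toList hm
            rwa [String.toList_ofList] at h6
          have hend : PySem.Str.endswith (PySem.Str.lower c3) " season 6 episodes" = true := by
            rw [PySem.Str.endswith_eq, PySem.Chars.endswith_iff]
            exact ⟨p, by rw [hlow, hD]; simp⟩
          have hfalse := (hall 6 (by decide)).2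
          rw [epKL_n6] at hfalse
          rw [hend] at hfalse
          exact absurd hfalse (by simp)
        · have hD : D = (['7'] : List Char) := by
            have h6 := congrArg String.toList hm
            rwa [String.toList_ofList] at h6
          have hend : PySem.Str.endswith (PySem.Str.lower c3) " season 7 episodes" = true := by
            rw [PySem.Str.endswith_eq, PySem.Chars.endswith_iff]
            exact ⟨p, by rw [hlow, hD]; simp⟩
          have hfalse := (hall 7 (by decide)).2
          rw [epKL_n7] at hfalse
          rw [hend] at hfalse
          exact absurd hfalse (by simp)
        · have hD : D = (['8'] : List Char) := by
            have h6 := congrArg String.toList hm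
            rwa [String.toList_ofList] at h6
          have hend : PySem.Str.endswith (PySem.Str.lower c3) " season 8 episodes" = true := by
            rw [PySem.Str.endswith_eq, PySem.Chars.endswith_iff]
            exact ⟨p, by rw [hlow, hD]; simp⟩
          have hfalse := (hall 8 (by decide)).2
          rw [epKL_n8] at hfalse
          rw [hend] at hfalse
          exact absurd hfalse (by simp)
        · have hD : D = (['9'] : List Char) := by
            have h6 := congrArg String.toList hm
            rwa [String.toList_ofList] at h6
          have hend : PySem.Str.endswith (PySem.Str.lower c3) " season 9 episodes" = true := by
            rw [PySem.Str.endswith_eq, PySem.Chars.endswith_iff]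
            exact ⟨p, by rw [hlow, hD]; simp⟩
          have hfalse := (hall 9 (by decide)).2
          rw [epKL_n9] at hfalse
          rw [hend] at hfalse
          exact absurd hfalse (by simp)
        · have hD : D = (['1','0'] : List Char) := by
            have h6 := congrArg String.toList hm
            rwa [String.toList_ofList] at h6
          have hend : PySem.Str.endswith (PySem.Str.lower c3) " season 10 episodes" = true := by
            rw [PySem.Str.endswith_eq, PySem.Chars.endswith_iff]
            exact ⟨p, by rw [hlow, hD]; simp⟩
          have hfalse := (hall 10 (by decide)).2
          rw [epKL_n10] at hfalse
          rw [hend] at hfalse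
          exact absurd hfalse (by simp)
    simp only [epMainA, epMainB, hA, hB]


-- ===== VERDICT (by name: the statement is the Claim_ definition above) =====
theorem get_episodes_spec : Claim_equal_get_episodes := by
  intro c3 nl _
  unfold Spec_get_episodes get_episodes get_episodes_alt
  exact epMain_eq _ _
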